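-- pv_equiv track=rewrite | github.com/Alex-S-H-P/guitare-predictor | codebase/predict_with_key.py | key_estimation
-- ===== SOURCE A (Python) =====
-- def simple_note(n: str):
--     return n.partition(':')[0]
--
-- def notes_by_key(key: str):
--     C_notes = ['C', 'D', 'E', 'F', 'G', 'A', 'B']
--     Csharp_notes = ['C#', 'Eb', 'F', 'F#', 'Ab', 'Bb', 'B#']
--     D_notes = ['D', 'E', 'F#', 'G', 'A', 'B', 'C#']
--     Eb_notes = ['Eb', 'F', 'G', 'Ab', 'Bb', 'C', 'D']
--     E_notes = ['E', 'F#', 'Ab', 'A', 'B', 'C#', 'Eb']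
--     F_notes = ['F', 'G', 'A', 'Bb', 'C', 'D', 'E']
--     Fsharp_notes = ['F#', 'Ab', 'Bb', 'B', 'C#', 'Eb', 'F']
--     G_notes = ['G', 'A', 'B', 'C', 'D', 'E', 'F#']
--     Ab_notes = ['Ab', 'Bb', 'C', 'C#', 'Eb', 'F', 'G']
--     A_notes = ['A', 'B', 'C#', 'D', 'E', 'F#', 'Ab']
--     Bb_notes = ['Bb', 'C', 'D', 'Eb', 'F', 'G', 'A']
--     B_notes = ['B', 'C#', 'Eb', 'E', 'F#', 'Ab', 'Bb']
--
--     if key=='C':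
--         return C_notes
--     elif key=='C#':
--         return Csharp_notes
--     elif key=='D':
--         return D_notes
--     elif key=='Eb':
--         return Eb_notes
--     elif key=='E':
--         return E_notes
--     elif key=='F':
--         return F_notes
--     elif key=='F#':
--         return Fsharp_notes
--     elif key=='G':
--         return G_notes
--     elif key=='Ab':
--         return Ab_notes
--     elif key=='A':
--         return A_notes
--     elif key=='Bb':
--         return Bb_notes
--     else:
--         return B_notes
--
-- def key_estimation(Y):
--     keys = ['C', 'C#', 'D', 'Eb', 'E', 'F', 'F#', 'G', 'Ab', 'A', 'Bb', 'B']
--     key_it = [0]*12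
--
--     for note in Y:
--         for i in range(12):
--             if simple_note(note) in notes_by_key(keys[i]):
--                 key_it[i]+=1
--     return keys[key_it.index(max(key_it))]
-- ===== SOURCE B (Python) =====
-- def simple_note(n: str):
--     return n.partition(':')[0]
--
-- KEY_SCALES = [
--     ('C',  ['C', 'D', 'E', 'F', 'G', 'A', 'B']),
--     ('C#', ['C#', 'Eb', 'F', 'F#', 'Ab', 'Bb', 'B#']),
--     ('D',  ['D', 'E', 'F#', 'G', 'A', 'B', 'C#']),
--     ('Eb', ['Eb', 'F', 'G', 'Ab', 'Bb', 'C', 'D']),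
--     ('E',  ['E', 'F#', 'Ab', 'A', 'B', 'C#', 'Eb']),
--     ('F',  ['F', 'G', 'A', 'Bb', 'C', 'D', 'E']),
--     ('F#', ['F#', 'Ab', 'Bb', 'B', 'C#', 'Eb', 'F']),
--     ('G',  ['G', 'A', 'B', 'C', 'D', 'E', 'F#']),
--     ('Ab', ['Ab', 'Bb', 'C', 'C#', 'Eb', 'F', 'G']),
--     ('A',  ['A', 'B', 'C#', 'D', 'E', 'F#', 'Ab']),
--     ('Bb', ['Bb', 'C', 'D', 'Eb', 'F', 'G', 'A']),
--     ('B',  ['B', 'C#', 'Eb', 'E', 'F#', 'Ab', 'Bb']),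
-- ]
--
-- def key_estimation(Y):
--     # inverted index: simplified note -> positions of the keys whose scale contains it
--     index = {}
--     for i, (_, scale) in enumerate(KEY_SCALES):
--         for n in scale:
--             index[n] = index.get(n, []) + [i]
--     counts = [0] * 12
--     for note in Y:
--         for i in index.get(simple_note(note), []):
--             counts[i] += 1
--     # single scan for the first position holding the maximal count
--     best_i, best_c = 0, counts[0]
--     for i, c in enumerate(counts):
--         if c > best_c:
--             best_i, best_c = i, c
--     return KEY_SCALES[best_i][0]
-- ===== Notes on version B (the rewrite author's own statement) =====
-- stated objective: faster
-- what changed: A rescans all 12 scales per note with membership tests and then uses max+index; B precomputes an inverted index (note -> key positions), makes one pass over Y doing at most 7 counter increments per note, and selects the winner with a single first-max argmax scan, preserving tie order.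
import Mathlib
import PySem

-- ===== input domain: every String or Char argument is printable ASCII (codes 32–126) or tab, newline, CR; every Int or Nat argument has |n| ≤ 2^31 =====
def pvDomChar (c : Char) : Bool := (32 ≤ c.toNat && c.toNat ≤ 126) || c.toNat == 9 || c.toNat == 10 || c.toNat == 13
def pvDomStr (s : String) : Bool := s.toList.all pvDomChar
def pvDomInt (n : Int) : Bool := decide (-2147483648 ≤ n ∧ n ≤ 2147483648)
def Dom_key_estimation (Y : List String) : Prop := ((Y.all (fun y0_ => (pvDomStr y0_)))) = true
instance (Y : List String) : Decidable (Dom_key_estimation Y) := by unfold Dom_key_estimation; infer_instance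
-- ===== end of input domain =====

-- B replaces A's nested note×key membership loop by a precomputed inverted index (note -> key
-- positions), one increment pass over Y, and a single first-max argmax scan (objective: faster).


-- ===== PORT A =====
-- shared same-module helper (Source A and Source B define it verbatim)
-- n.partition(':')[0] is exactly the prefix of n before the first ':' (n itself if absent)
def simple_note_port (n : String) : String := String.ofList (n.toList.takeWhile (fun c => c ≠ ':'))

def notes_by_key_port (key : String) : List String :=
  if key = "C" then ["C", "D", "E", "F", "G", "A", "B"]
  else if key = "C#" then ["C#", "Eb", "F", "F#", "Ab", "Bb", "B#"]
  else if key = "D" then ["D", "E", "F#", "G", "A", "B", "C#"]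
  else if key = "Eb" then ["Eb", "F", "G", "Ab", "Bb", "C", "D"]
  else if key = "E" then ["E", "F#", "Ab", "A", "B", "C#", "Eb"]
  else if key = "F" then ["F", "G", "A", "Bb", "C", "D", "E"]
  else if key = "F#" then ["F#", "Ab", "Bb", "B", "C#", "Eb", "F"]
  else if key = "G" then ["G", "A", "B", "C", "D", "E", "F#"]
  else if key = "Ab" then ["Ab", "Bb", "C", "C#", "Eb", "F", "G"]
  else if key = "A" then ["A", "B", "C#", "D", "E", "F#", "Ab"]
  else if key = "Bb" then ["Bb", "C", "D", "Eb", "F", "G", "A"]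
  else ["B", "C#", "Eb", "E", "F#", "Ab", "Bb"]

def pvKeys : List String := ["C", "C#", "D", "Eb", "E", "F", "F#", "G", "Ab", "A", "Bb", "B"]

-- the body of A's 'for i in range(12)' loop over one note
def key_estimation_inner (note : String) (kit : List Int) : List Int :=
  (PySem.List.pyRange 0 12 1).foldl (fun kit i =>
    if (notes_by_key_port (PySem.List.pyGetD pvKeys i "")).contains (simple_note_port note) then
      PySem.List.pySetD kit i (PySem.List.pyGetD kit i 0 + 1)
    else kit) kit

def key_estimation (Y : List String) : String :=
  let keys := pvKeys
  let key_it := Y.foldl (fun kit note => key_estimation_inner note kit) (List.replicate 12 (0 : Int))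
  -- max(key_it) / key_it.index(...) / keys[...] never raise: key_it always has 12 entries,
  -- so the .getD defaults below are never reached
  let m := (PySem.List.max? key_it (fun x => x)).getD 0
  let i := (PySem.List.index? key_it m).getD 0
  PySem.List.pyGetD keys (i : Int) ""

-- ===== PORT B =====
-- Source B's module constant KEY_SCALES: the 12 keys paired with their scales
def pvKeyScales : List (String × List String) :=
  [("C",  ["C", "D", "E", "F", "G", "A", "B"]),
   ("C#", ["C#", "Eb", "F", "F#", "Ab", "Bb", "B#"]),
   ("D",  ["D", "E", "F#", "G", "A", "B", "C#"]),
   ("Eb", ["Eb", "F", "G", "Ab", "Bb", "C", "D"]),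
   ("E",  ["E", "F#", "Ab", "A", "B", "C#", "Eb"]),
   ("F",  ["F", "G", "A", "Bb", "C", "D", "E"]),
   ("F#", ["F#", "Ab", "Bb", "B", "C#", "Eb", "F"]),
   ("G",  ["G", "A", "B", "C", "D", "E", "F#"]),
   ("Ab", ["Ab", "Bb", "C", "C#", "Eb", "F", "G"]),
   ("A",  ["A", "B", "C#", "D", "E", "F#", "Ab"]),
   ("Bb", ["Bb", "C", "D", "Eb", "F", "G", "A"]),
   ("B",  ["B", "C#", "Eb", "E", "F#", "Ab", "Bb"])]

-- Source B's 'counts[i] += 1': in-place increment at index i; exact for 0 ≤ i < len(counts),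
-- the only indices occurring here (they come from enumerate of the 12 scales)
def pvBump : List Int → Int → List Int
  | [], _ => []
  | c :: cs, i => if i = 0 then (c + 1) :: cs else c :: pvBump cs (i - 1)

def key_estimation_alt (Y : List String) : String :=
  -- inverted index: simplified note -> positions of the keys whose scale contains it
  let index := (PySem.List.enumerate pvKeyScales 0).foldl
      (fun d p => p.2.2.foldl (fun d n => d.insert n (d.getD n [] ++ [p.1])) d)
      (PySem.Dict.empty : PySem.Dict String (List Int))
  let counts := Y.foldl (fun cs note =>
      (index.getD (simple_note_port note) []).foldl pvBump cs)
    (List.replicate 12 (0 : Int))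
  -- single scan for the first position holding the maximal count
  -- ('counts[0]' never raises: counts always has 12 entries, so headD's default is unreachable)
  let best := (PySem.List.enumerate counts 0).foldl
      (fun b p => if p.2 > b.2 then p else b) ((0 : Int), counts.headD 0)
  (PySem.List.pyGetD pvKeyScales best.1 ("", [])).1

-- ===== PRECONDITION & SPEC =====
def Spec_key_estimation (Y : List String) (out : String) : Prop := out = key_estimation_alt Y
instance (Y : List String) (out : String) : Decidable (Spec_key_estimation Y out) := by unfold Spec_key_estimation; infer_instance

-- ===== CLAIM (what is proved, stated in full; the proofs are below) =====
def Claim_equal_key_estimation : Prop := ∀ (Y : List String), Dom_key_estimation Y → Spec_key_estimation Y (key_estimation Y)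

-- ===== LEMMAS AND PROOFS =====

theorem pvBump_cons (c : Int) (cs : List Int) (i : Int) :
    pvBump (c :: cs) i = if i = 0 then (c + 1) :: cs else c :: pvBump cs (i - 1) := rfl

-- the common middle: per key, how many notes of Y (simplified) lie in its scale
def pvCnt (k : String) (Y : List String) : Int :=
  (Y.countP (fun note => (notes_by_key_port k).contains (simple_note_port note)) : Int)

def pvMid (Y : List String) : List Int := pvKeys.map (fun k => pvCnt k Y)

theorem pvMid_length (Y : List String) : (pvMid Y).length = 12 := by
  simp [pvMid, pvKeys]

theorem pv_foldlen (note : String) (l : List Int) (kit : List Int) :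
    (l.foldl (fun kit i =>
      if (notes_by_key_port (PySem.List.pyGetD pvKeys i "")).contains (simple_note_port note) then
        PySem.List.pySetD kit i (PySem.List.pyGetD kit i 0 + 1)
      else kit) kit).length = kit.length := by
  induction l generalizing kit with
  | nil => rfl
  | cons x xs ih =>
    rw [List.foldl_cons, ih]
    split <;> simp [PySem.List.length_pySetD]

theorem inner_getD (note : String) (m : Nat) (kit : List Int) (hm : m ≤ kit.length) (j : Nat) :
    PySem.List.pyGetD ((PySem.List.pyRange 0 (m : Int) 1).foldl (fun kit i =>
      if (notes_by_key_port (PySem.List.pyGetD pvKeys i "")).contains (simple_note_port note) then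
        PySem.List.pySetD kit i (PySem.List.pyGetD kit i 0 + 1)
      else kit) kit) (j : Int) 0 =
    PySem.List.pyGetD kit (j : Int) 0 + (if j < m ∧
      (notes_by_key_port (PySem.List.pyGetD pvKeys (j : Int) "")).contains (simple_note_port note) = true
      then 1 else 0) := by
  induction m with
  | zero => simp
  | succ m ih =>
    have hm' : m ≤ kit.length := Nat.le_of_succ_le hm
    have hcast : ((m + 1 : Nat) : Int) = (m : Int) + 1 := by push_cast; ring
    rw [hcast, PySem.List.pyRange_one_succ_right (by positivity), List.foldl_append,
      List.foldl_cons, List.foldl_nil]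
    have hpl : ∀ (l : List Int),
        (l.foldl (fun kit i =>
          if (notes_by_key_port (PySem.List.pyGetD pvKeys i "")).contains (simple_note_port note) then
            PySem.List.pySetD kit i (PySem.List.pyGetD kit i 0 + 1)
          else kit) kit).length = kit.length := fun l => pv_foldlen note l kit
    by_cases hc : (notes_by_key_port (PySem.List.pyGetD pvKeys (m : Int) "")).contains
        (simple_note_port note) = true
    · rw [if_pos hc]
      rw [PySem.List.pyGetD_pySetD_natCast _ m j _ 0 (by rw [hpl]; omega)]
      by_cases hj : j = m
      · subst hj
        rw [if_pos rfl, ih hm', if_neg (fun h => Nat.lt_irrefl j h.1),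
          if_pos ⟨Nat.lt_succ_self j, hc⟩]
        ring
      · rw [if_neg hj, ih hm']
        congr 1
        apply if_congr _ rfl rfl
        constructor
        · rintro ⟨hlt, hcc⟩; exact ⟨by omega, hcc⟩
        · rintro ⟨hlt, hcc⟩; exact ⟨by omega, hcc⟩
    · rw [if_neg hc, ih hm']
      congr 1
      apply if_congr _ rfl rfl
      constructor
      · rintro ⟨hlt, hcc⟩; exact ⟨by omega, hcc⟩
      · rintro ⟨hlt, hcc⟩
        by_cases hj : j = m
        · subst hj; exact absurd hcc hc
        · exact ⟨by omega, hcc⟩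

theorem inner_pyGetD (note : String) (kit : List Int) (h : kit.length = 12) (j : Nat) :
    PySem.List.pyGetD (key_estimation_inner note kit) (j : Int) 0 =
    PySem.List.pyGetD kit (j : Int) 0 + (if j < 12 ∧
      (notes_by_key_port (PySem.List.pyGetD pvKeys (j : Int) "")).contains (simple_note_port note) = true
      then 1 else 0) := by
  have h12 : ((12 : Nat) : Int) = (12 : Int) := by norm_num
  have := inner_getD note 12 kit (by omega) j
  rw [h12] at this
  unfold key_estimation_inner
  exact this

theorem foldA_eq (Y : List String) :
    Y.foldl (fun kit note => key_estimation_inner note kit) (List.replicate 12 (0 : Int)) = pvMid Y := by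
  induction Y using List.reverseRecOn with
  | nil => rfl
  | append_singleton Y y ih =>
    rw [List.foldl_append, List.foldl_cons, List.foldl_nil, ih]
    have hlen : (pvMid Y).length = 12 := pvMid_length Y
    apply List.ext_getElem
    · unfold key_estimation_inner
      rw [pv_foldlen, hlen, pvMid_length]
    · intro j h1 h2
      have hj12 : j < 12 := by rw [pvMid_length] at h2; exact h2
      have b1 : ∀ (l : List Int) (hj : j < l.length), l[j] = PySem.List.pyGetD l (j : Int) 0 :=
        fun l hj => by rw [PySem.List.pyGetD_natCast, List.getD_eq_getElem l 0 hj]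
      rw [b1 _ h1, b1 _ h2, inner_pyGetD y (pvMid Y) hlen j]
      have hkj : j < pvKeys.length := by simpa [pvKeys] using hj12
      have hk : ∀ (Z : List String), PySem.List.pyGetD (pvMid Z) (j : Int) 0 = pvCnt (pvKeys[j]) Z := by
        intro Z
        rw [PySem.List.pyGetD_natCast, List.getD_eq_getElem _ _ (by rw [pvMid_length]; exact hj12)]
        unfold pvMid
        rw [List.getElem_map]
      have hkey : PySem.List.pyGetD pvKeys (j : Int) "" = pvKeys[j] := by
        rw [PySem.List.pyGetD_natCast, List.getD_eq_getElem _ _ hkj]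
      rw [hk, hk, hkey]
      unfold pvCnt
      rw [List.countP_append]
      have : List.countP (fun note => (notes_by_key_port pvKeys[j]).contains (simple_note_port note)) [y]
          = if (notes_by_key_port pvKeys[j]).contains (simple_note_port y) = true then 1 else 0 := by
        simp [List.countP_cons]
      rw [this]
      by_cases hcond : (notes_by_key_port pvKeys[j]).contains (simple_note_port y) = true
      · rw [if_pos hcond, if_pos ⟨hj12, hcond⟩]
        push_cast; ring
      · rw [if_neg hcond, if_neg (fun h => hcond h.2)]
        push_cast; ring

-- ---- B side: the inverted index ----

-- what index.get(s, []) is: key positions listed per scale occurrence of s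
def pvIdxList (s : String) : List Int :=
  (PySem.List.enumerate pvKeyScales 0).flatMap (fun p => List.replicate (p.2.2.count s) p.1)

theorem dict_scale_step (scale : List String) (d : PySem.Dict String (List Int)) (s : String) (i : Int) :
    (scale.foldl (fun d n => d.insert n (d.getD n [] ++ [i])) d).getD s []
      = d.getD s [] ++ List.replicate (scale.count s) i := by
  induction scale generalizing d with
  | nil => simp
  | cons n rest ih =>
    rw [List.foldl_cons, ih, PySem.Dict.getD_insert, List.count_cons]
    by_cases h : s = n
    · subst h
      simp [List.append_assoc, ← List.replicate_succ]
    · have : (n == s) = false := by simp [Ne.symm h]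
      simp [h, this]

theorem dict_build (ps : List (String × List String)) (k : Int)
    (d : PySem.Dict String (List Int)) (s : String) :
    ((PySem.List.enumerate ps k).foldl
        (fun d p => p.2.2.foldl (fun d n => d.insert n (d.getD n [] ++ [p.1])) d) d).getD s []
      = d.getD s [] ++ (PySem.List.enumerate ps k).flatMap (fun p => List.replicate (p.2.2.count s) p.1) := by
  induction ps generalizing k d with
  | nil => simp [PySem.List.enumerate_nil]
  | cons q ps ih =>
    rw [PySem.List.enumerate_cons, List.foldl_cons, ih, dict_scale_step, List.flatMap_cons,
      List.append_assoc]

-- a string occurs at most once in each (concrete, duplicate-free) scale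
theorem count_nodup (l : List String) (nd : l.Nodup) (s : String) :
    l.count s = if l.contains s then 1 else 0 := by
  by_cases h : s ∈ l
  · rw [List.count_eq_one_of_mem nd h, if_pos (by simpa using h)]
  · rw [List.count_eq_zero_of_not_mem h, if_neg (by simpa using h)]

theorem scale_nodup (j : Nat) (hj : j < 12) :
    (notes_by_key_port (PySem.List.pyGetD pvKeys (j : Int) "")).Nodup := by
  interval_cases j <;> decide

theorem count_idx (s : String) (j : Nat) (hj : j < 12) :
    List.count ((j : Nat) : Int) (pvIdxList s)
      = if (notes_by_key_port (PySem.List.pyGetD pvKeys (j : Int) "")).contains s then 1 else 0 := by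
  rw [← count_nodup _ (scale_nodup j hj) s]
  have hred : pvIdxList s =
      List.replicate ((["C", "D", "E", "F", "G", "A", "B"] : List String).count s) 0 ++
      (List.replicate ((["C#", "Eb", "F", "F#", "Ab", "Bb", "B#"] : List String).count s) 1 ++
      (List.replicate ((["D", "E", "F#", "G", "A", "B", "C#"] : List String).count s) 2 ++
      (List.replicate ((["Eb", "F", "G", "Ab", "Bb", "C", "D"] : List String).count s) 3 ++
      (List.replicate ((["E", "F#", "Ab", "A", "B", "C#", "Eb"] : List String).count s) 4 ++
      (List.replicate ((["F", "G", "A", "Bb", "C", "D", "E"] : List String).count s) 5 ++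
      (List.replicate ((["F#", "Ab", "Bb", "B", "C#", "Eb", "F"] : List String).count s) 6 ++
      (List.replicate ((["G", "A", "B", "C", "D", "E", "F#"] : List String).count s) 7 ++
      (List.replicate ((["Ab", "Bb", "C", "C#", "Eb", "F", "G"] : List String).count s) 8 ++
      (List.replicate ((["A", "B", "C#", "D", "E", "F#", "Ab"] : List String).count s) 9 ++
      (List.replicate ((["Bb", "C", "D", "Eb", "F", "G", "A"] : List String).count s) 10 ++
      List.replicate ((["B", "C#", "Eb", "E", "F#", "Ab", "Bb"] : List String).count s) 11)))))))))) := by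
    simp [pvIdxList, pvKeyScales, PySem.List.enumerate_cons, PySem.List.enumerate_nil]
  rw [hred]
  interval_cases j <;>
    norm_num [List.count_append, List.count_replicate, pvKeys, notes_by_key_port,
      PySem.List.pyGetD] <;> rfl

-- ---- B side: the increment pass ----

theorem pvBump_length (cs : List Int) (i : Int) : (pvBump cs i).length = cs.length := by
  induction cs generalizing i with
  | nil => rfl
  | cons c cs ih =>
    unfold pvBump
    split <;> simp [ih]

theorem bumpfold_length (I : List Int) (cs : List Int) :
    (I.foldl pvBump cs).length = cs.length := by
  induction I generalizing cs with
  | nil => rfl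
  | cons i I ih => rw [List.foldl_cons, ih, pvBump_length]

theorem pvBump_getD (cs : List Int) (i : Int) (j : Nat) :
    (pvBump cs i).getD j 0 = cs.getD j 0 + (if (j : Int) = i ∧ j < cs.length then 1 else 0) := by
  induction cs generalizing i j with
  | nil => simp [pvBump]
  | cons c cs ih =>
    rw [pvBump_cons]
    by_cases hi : i = 0
    · subst hi
      rw [if_pos rfl]
      cases j with
      | zero => simp
      | succ j =>
        rw [if_neg (by push_cast; omega)]
        simp
    · rw [if_neg hi]
      cases j with
      | zero =>
        rw [if_neg (fun h => hi (by omega))]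
        simp
      | succ j =>
        simp only [List.getD_cons_succ]
        rw [ih (i - 1) j]
        congr 1
        apply if_congr _ rfl rfl
        constructor
        · rintro ⟨h1, h2⟩
          constructor
          · push_cast at h1 ⊢; omega
          · simp; omega
        · rintro ⟨h1, h2⟩
          constructor
          · push_cast at h1 ⊢; omega
          · simp at h2; omega

theorem bumpfold_getD (I : List Int) (cs : List Int) (j : Nat) (hj : j < cs.length) :
    (I.foldl pvBump cs).getD j 0 = cs.getD j 0 + (I.count ((j : Nat) : Int) : Int) := by
  induction I generalizing cs with
  | nil => simp
  | cons i I ih =>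
    rw [List.foldl_cons, ih (pvBump cs i) (by rw [pvBump_length]; exact hj),
      pvBump_getD cs i j, List.count_cons]
    by_cases h : ((j : Nat) : Int) = i
    · rw [if_pos ⟨h, hj⟩]
      have hb : (i == ((j : Nat) : Int)) = true := by simp [h.symm]
      simp only [hb, if_true]
      push_cast; ring
    · rw [if_neg (fun hc => h hc.1)]
      have hb : (i == ((j : Nat) : Int)) = false := by simp [Ne.symm h]
      simp only [hb, Bool.false_eq_true, if_false]
      push_cast; ring

theorem pvIndex_getD (s : String) :
    ((PySem.List.enumerate pvKeyScales 0).foldl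
        (fun d p => p.2.2.foldl (fun d n => d.insert n (d.getD n [] ++ [p.1])) d)
        (PySem.Dict.empty : PySem.Dict String (List Int))).getD s []
      = pvIdxList s := by
  rw [dict_build]
  simp [pvIdxList]

theorem foldB_eq (Y : List String) :
    Y.foldl (fun cs note => (pvIdxList (simple_note_port note)).foldl pvBump cs)
      (List.replicate 12 (0 : Int)) = pvMid Y := by
  induction Y using List.reverseRecOn with
  | nil => decide
  | append_singleton Y y ih =>
    rw [List.foldl_append, List.foldl_cons, List.foldl_nil, ih]
    have hlen : (pvMid Y).length = 12 := pvMid_length Y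
    apply List.ext_getElem
    · rw [bumpfold_length, hlen, pvMid_length]
    · intro j h1 h2
      have hj12 : j < 12 := by rw [pvMid_length] at h2; exact h2
      have b1 : ∀ (l : List Int) (hj : j < l.length), l[j] = l.getD j 0 :=
        fun l hj => (List.getD_eq_getElem l 0 hj).symm
      rw [b1 _ h1, b1 _ h2, bumpfold_getD _ _ j (by rw [hlen]; exact hj12),
        count_idx (simple_note_port y) j hj12]
      have hkj : j < pvKeys.length := by simpa [pvKeys] using hj12
      have hk : ∀ (Z : List String), (pvMid Z).getD j 0 = pvCnt (pvKeys[j]) Z := by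
        intro Z
        rw [List.getD_eq_getElem _ _ (by rw [pvMid_length]; exact hj12)]
        unfold pvMid
        rw [List.getElem_map]
      have hkey : PySem.List.pyGetD pvKeys (j : Int) "" = pvKeys[j] := by
        rw [PySem.List.pyGetD_natCast, List.getD_eq_getElem _ _ hkj]
      rw [hk, hk, hkey]
      unfold pvCnt
      rw [List.countP_append]
      have hone : List.countP (fun note => (notes_by_key_port pvKeys[j]).contains (simple_note_port note)) [y]
          = if (notes_by_key_port pvKeys[j]).contains (simple_note_port y) = true then 1 else 0 := by
        simp [List.countP_cons]
      rw [hone]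
      by_cases hcond : (notes_by_key_port pvKeys[j]).contains (simple_note_port y) = true
      · rw [if_pos hcond]
        push_cast; ring
      · rw [if_neg hcond]
        push_cast; ring

-- ---- B side: the argmax scan ----

theorem foldl_max_all_le (t : List Int) (a : Int) (h : ∀ y ∈ t, y ≤ a) : t.foldl max a = a := by
  rcases PySem.List.foldl_max_mem t a with he | hm
  · exact he
  · exact le_antisymm (h _ hm) (PySem.List.le_foldl_max t a).1

theorem sel_keep (t : List Int) (k : Int) (b : Int × Int) (h : ∀ x ∈ t, x ≤ b.2) :
    (PySem.List.enumerate t k).foldl (fun b p => if p.2 > b.2 then p else b) b = b := by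
  induction t generalizing k with
  | nil => simp [PySem.List.enumerate_nil]
  | cons a t ih =>
    rw [PySem.List.enumerate_cons, List.foldl_cons]
    have hna : ¬ ((k, a).2 > b.2) := not_lt.mpr (h a (by simp))
    rw [if_neg hna]
    exact ih (k + 1) (fun x hx => h x (by simp [hx]))

theorem sel_move (t : List Int) (k bi bs : Int) (h : ∃ x ∈ t, bs < x) :
    (PySem.List.enumerate t k).foldl (fun b p => if p.2 > b.2 then p else b) (bi, bs)
      = (k + (((PySem.List.index? t (t.foldl max bs)).getD 0 : Nat) : Int), t.foldl max bs) := by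
  induction t generalizing k bi bs with
  | nil => simp at h
  | cons a t ih =>
    rw [PySem.List.enumerate_cons, List.foldl_cons]
    by_cases ha : bs < a
    · rw [if_pos (show ((k, a).2 > (bi, bs).2) from ha)]
      have hfold : (a :: t).foldl max bs = t.foldl max a := by
        rw [List.foldl_cons, max_eq_right (le_of_lt ha)]
      by_cases h2 : ∃ x ∈ t, a < x
      · rw [ih (k + 1) k a h2, hfold]
        obtain ⟨x, hx, hax⟩ := h2
        have haM : a < t.foldl max a := lt_of_lt_of_le hax ((PySem.List.le_foldl_max t a).2 x hx)
        have hMem : t.foldl max a ∈ t := by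
          rcases PySem.List.foldl_max_mem t a with he | hm
          · omega
          · exact hm
        obtain ⟨n, hn⟩ := Option.isSome_iff_exists.mp ((PySem.List.index?_isSome_iff t _).mpr hMem)
        rw [PySem.List.index?_cons_of_ne _ (ne_of_lt haM), hn]
        simp only [Option.map_some, Option.getD_some]
        push_cast; ring_nf
      · have h2' : ∀ x ∈ t, x ≤ a := fun x hx => not_lt.mp (fun hlt => h2 ⟨x, hx, hlt⟩)
        rw [sel_keep t (k + 1) (k, a) h2', hfold, foldl_max_all_le t a h2',
          PySem.List.index?_cons_self]
        simp
    · rw [if_neg ha]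
      have hbsa : a ≤ bs := not_lt.mp ha
      obtain ⟨x, hx, hbx⟩ := h
      have hxt : x ∈ t := by
        rcases List.mem_cons.mp hx with rfl | hxt
        · omega
        · exact hxt
      rw [ih (k + 1) bi bs ⟨x, hxt, hbx⟩]
      have hfold : (a :: t).foldl max bs = t.foldl max bs := by
        rw [List.foldl_cons, max_eq_left hbsa]
      have hbsM : bs < t.foldl max bs := lt_of_lt_of_le hbx ((PySem.List.le_foldl_max t bs).2 x hxt)
      have hMem : t.foldl max bs ∈ t := by
        rcases PySem.List.foldl_max_mem t bs with he | hm
        · omega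
        · exact hm
      obtain ⟨n, hn⟩ := Option.isSome_iff_exists.mp ((PySem.List.index?_isSome_iff t _).mpr hMem)
      rw [hfold, PySem.List.index?_cons_of_ne _ (by omega), hn]
      simp only [Option.map_some, Option.getD_some]
      push_cast; ring_nf

theorem sel_top (x : Int) (t : List Int) :
    (PySem.List.enumerate (x :: t) 0).foldl (fun b p => if p.2 > b.2 then p else b)
        ((0 : Int), (x :: t).headD 0)
      = ((((PySem.List.index? (x :: t) ((PySem.List.max? (x :: t) (fun y => y)).getD 0)).getD 0 : Nat) : Int),
         (PySem.List.max? (x :: t) (fun y => y)).getD 0) := by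
  rw [PySem.List.max?_id_cons]
  simp only [List.headD_cons, Option.getD_some]
  rw [PySem.List.enumerate_cons, List.foldl_cons]
  rw [if_neg (show ¬ (((0 : Int), x).2 > ((0 : Int), x).2) from lt_irrefl x)]
  simp only [zero_add]
  by_cases h : ∃ y ∈ t, x < y
  · rw [sel_move t 1 0 x h]
    obtain ⟨y, hy, hxy⟩ := h
    have hxM : x < t.foldl max x := lt_of_lt_of_le hxy ((PySem.List.le_foldl_max t x).2 y hy)
    have hMem : t.foldl max x ∈ t := by
      rcases PySem.List.foldl_max_mem t x with he | hm
      · omega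
      · exact hm
    obtain ⟨n, hn⟩ := Option.isSome_iff_exists.mp ((PySem.List.index?_isSome_iff t _).mpr hMem)
    rw [PySem.List.index?_cons_of_ne _ (ne_of_lt hxM), hn]
    simp only [Option.map_some, Option.getD_some]
    push_cast; ring_nf
  · have h' : ∀ y ∈ t, y ≤ x := fun y hy => not_lt.mp (fun hlt => h ⟨y, hy, hlt⟩)
    rw [sel_keep t 1 ((0 : Int), x) h', foldl_max_all_le t x h', PySem.List.index?_cons_self]
    simp

theorem final_get (n : Nat) (hn : n < 12) :
    PySem.List.pyGetD pvKeys ((n : Nat) : Int) ""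
      = (PySem.List.pyGetD pvKeyScales ((n : Nat) : Int) ("", [])).1 := by
  interval_cases n <;> decide

-- ===== VERDICT (by name: the statement is the Claim_ definition above) =====
theorem key_estimation_spec : Claim_equal_key_estimation := by
  intro Y _
  unfold Spec_key_estimation key_estimation key_estimation_alt
  simp only [pvIndex_getD, foldA_eq, foldB_eq]
  obtain ⟨x, t, hs⟩ : ∃ x t, pvMid Y = x :: t := by
    cases hmid : pvMid Y with
    | nil => have hl := pvMid_length Y; rw [hmid] at hl; simp at hl
    | cons x t => exact ⟨x, t, rfl⟩
  rw [hs, sel_top x t]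
  have hMmem : ((PySem.List.max? (x :: t) (fun y => y)).getD 0) ∈ x :: t := by
    rw [PySem.List.max?_id_cons]
    simp only [Option.getD_some]
    rcases PySem.List.foldl_max_mem t x with he | hm
    · rw [he]; exact List.mem_cons_self
    · exact List.mem_cons_of_mem x hm
  obtain ⟨n, hn⟩ := Option.isSome_iff_exists.mp
    ((PySem.List.index?_isSome_iff (x :: t) _).mpr hMmem)
  obtain ⟨hk, -, -⟩ := PySem.List.getElem_of_index?_eq_some hn
  have hlen : (x :: t).length = 12 := by rw [← hs, pvMid_length]
  rw [hn]
  simp only [Option.getD_some]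
  exact final_get n (by rw [hlen] at hk; exact hk)
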